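-- pv_equiv track=rewrite | github.com/benquick123/code-profiling | code/batch-2/dn6 - spet tviti/M-17141-1611.py | se_poznata1
-- ===== SOURCE A (Python) =====
-- def unikati(s):
--     novi = []
--     for e in s:
--         if e not in novi:
--             novi.append(e)
--     return novi
--
-- def avtor(tvit):
--     for e in tvit.split():
--         e = e.replace(":", "")
--         return e
--
-- def vsi_avtorji(tviti):
--     vsi = []
--     for tvit in tviti:
--         vsi.append(avtor(tvit))
--     return unikati(vsi)
--
-- def izloci_besedo(beseda):
--     if beseda.isalnum():
--         return (beseda)
--     else:
--         for i in beseda.strip():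
--             if i.isalnum() is True:
--                 pass
--             else:
--                 if i == "-":
--                     pass
--                 else:
--                     beseda = beseda.replace(i, "")
--         return beseda
--
-- def se_zacne_z_nejceva(tviti, c):
--     rez = []
--     for tvit in tviti:
--         for beseda in tvit.split():
--             if beseda[0] == c:
--                 beseda = izloci_besedo(beseda)
--                 rez.append(beseda)
--     return rez
--
-- def zberi_se_zacne_z(tviti, c):
--     return unikati(se_zacne_z_nejceva(tviti, c))
--
-- def vse_afne(tviti):
--     return zberi_se_zacne_z(tviti, "@")
--
-- def vse_osebe(tviti):
--     return sorted(unikati(vse_afne(tviti) + vsi_avtorji(tviti)))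
--
-- def se_poznata1(tviti, oseba1, oseba2):
--     if (oseba1 not in vse_osebe(tviti)) | (oseba2 not in vse_osebe(tviti)):
--         return False
--
--     for tvit in tviti:
--         if avtor(tvit) == oseba1:
--             for beseda in tvit.split():
--                 if oseba2 == izloci_besedo(beseda):
--                     return True
--         elif avtor(tvit) == oseba2:
--             for beseda in tvit.split():
--                 if oseba1 == izloci_besedo(beseda):
--                     return True
-- ===== SOURCE B (Python) =====
-- # B: same guard via the same helpers, but the pair search is one index-building
-- # pass over all tweets into a set of (author, cleaned-word) pairs + two O(1) lookups,
-- # instead of A's per-tweet if/elif branching with nested early-return scans.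
--
-- def unikati(s):
--     novi = []
--     for e in s:
--         if e not in novi:
--             novi.append(e)
--     return novi
--
-- def avtor(tvit):
--     for e in tvit.split():
--         e = e.replace(":", "")
--         return e
--
-- def vsi_avtorji(tviti):
--     vsi = []
--     for tvit in tviti:
--         vsi.append(avtor(tvit))
--     return unikati(vsi)
--
-- def izloci_besedo(beseda):
--     if beseda.isalnum():
--         return (beseda)
--     else:
--         for i in beseda.strip():
--             if i.isalnum() is True:
--                 pass
--             else:
--                 if i == "-":
--                     pass
--                 else:
--                     beseda = beseda.replace(i, "")
--         return beseda
--
-- def se_zacne_z_nejceva(tviti, c):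
--     rez = []
--     for tvit in tviti:
--         for beseda in tvit.split():
--             if beseda[0] == c:
--                 beseda = izloci_besedo(beseda)
--                 rez.append(beseda)
--     return rez
--
-- def zberi_se_zacne_z(tviti, c):
--     return unikati(se_zacne_z_nejceva(tviti, c))
--
-- def vse_afne(tviti):
--     return zberi_se_zacne_z(tviti, "@")
--
-- def vse_osebe(tviti):
--     return sorted(unikati(vse_afne(tviti) + vsi_avtorji(tviti)))
--
-- def se_poznata1(tviti, oseba1, oseba2):
--     osebe = vse_osebe(tviti)
--     if (oseba1 not in osebe) | (oseba2 not in osebe):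
--         return False
--     pairs = set()
--     for tvit in tviti:
--         a = avtor(tvit)
--         for beseda in tvit.split():
--             pairs.add((a, izloci_besedo(beseda)))
--     if (oseba1, oseba2) in pairs or (oseba2, oseba1) in pairs:
--         return True
-- ===== Notes on version B (the rewrite author's own statement) =====
-- stated objective: faster
-- what changed: The per-tweet if/elif author branching with nested early-return word scans is replaced by one index-building pass collecting all (author, cleaned-word) pairs into a set followed by two O(1) lookups, and the guard's vse_osebe is computed once instead of twice.
import Mathlib
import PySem

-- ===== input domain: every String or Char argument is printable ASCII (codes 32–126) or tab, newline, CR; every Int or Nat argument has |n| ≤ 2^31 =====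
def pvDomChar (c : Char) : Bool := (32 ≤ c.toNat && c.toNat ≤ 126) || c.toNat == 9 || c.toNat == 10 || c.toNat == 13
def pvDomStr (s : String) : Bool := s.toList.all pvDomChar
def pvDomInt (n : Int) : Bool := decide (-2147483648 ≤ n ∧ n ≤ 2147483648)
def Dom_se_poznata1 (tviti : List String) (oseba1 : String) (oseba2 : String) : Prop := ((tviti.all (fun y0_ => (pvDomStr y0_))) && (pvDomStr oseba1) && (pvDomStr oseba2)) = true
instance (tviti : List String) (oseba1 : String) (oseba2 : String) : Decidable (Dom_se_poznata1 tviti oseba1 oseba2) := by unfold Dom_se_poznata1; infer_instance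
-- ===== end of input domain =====

-- B keeps A's guard (same helpers) but replaces the per-tweet if/elif search with one
-- index-building pass into a set of (author, cleaned word) pairs followed by two lookups.
-- The guard helpers are shared by both ports, exactly as both Pythons share them.

-- ===== PORT A =====
def unikatiA {α : Type} [BEq α] (s : List α) : List α :=
  s.foldl (fun novi e => if novi.contains e then novi else novi ++ [e]) []

def avtorA (tvit : String) : Option String :=
  match PySem.Str.split₀ tvit with
  | [] => none                                   -- Python: for-loop body never runs, returns None
  | e :: _ => some (PySem.Str.replace e ":" "")

def vsi_avtorjiA (tviti : List String) : List (Option String) :=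
  unikatiA (tviti.foldl (fun vsi tvit => vsi ++ [avtorA tvit]) [])

def izloci_besedoA (beseda : String) : String :=
  if PySem.Str.strIsalnum beseda then beseda
  else (PySem.Str.strip beseda).toList.foldl
    (fun b i => if PySem.Chars.isalnum i then b
                else if i = '-' then b
                else PySem.Str.replace b (String.ofList [i]) "") beseda

def se_zacne_z_nejcevaA (tviti : List String) (c : Char) : List String :=
  tviti.foldl (fun rez tvit =>
    (PySem.Str.split₀ tvit).foldl (fun rez beseda =>
      if PySem.Str.pyGet? beseda 0 == some c then rez ++ [izloci_besedoA beseda] else rez) rez) []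

def zberi_se_zacne_zA (tviti : List String) (c : Char) : List String :=
  unikatiA (se_zacne_z_nejcevaA tviti c)

def vse_afneA (tviti : List String) : List String := zberi_se_zacne_zA tviti '@'

-- key o.getD "": inside Pre_ the list mixes no None with strings (it is all-some, [], or
-- [none]), where this sort is exact; on mixed lists Python's sorted raises (outside Pre_).
def vse_osebeA (tviti : List String) : List (Option String) :=
  PySem.List.sorted (unikatiA ((vse_afneA tviti).map some ++ vsi_avtorjiA tviti))
    (fun o => o.getD "") false

def sePoznataLoopA (oseba1 oseba2 : String) : List String → Option Bool
  | [] => none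
  | tvit :: rest =>
    if avtorA tvit == some oseba1 then
      if (PySem.Str.split₀ tvit).any (fun beseda => oseba2 == izloci_besedoA beseda) then some true
      else sePoznataLoopA oseba1 oseba2 rest
    else if avtorA tvit == some oseba2 then
      if (PySem.Str.split₀ tvit).any (fun beseda => oseba1 == izloci_besedoA beseda) then some true
      else sePoznataLoopA oseba1 oseba2 rest
    else sePoznataLoopA oseba1 oseba2 rest

def se_poznata1 (tviti : List String) (oseba1 : String) (oseba2 : String) : Option Bool :=
  if (!(vse_osebeA tviti).contains (some oseba1)) || (!(vse_osebeA tviti).contains (some oseba2))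
  then some false
  else sePoznataLoopA oseba1 oseba2 tviti

-- ===== PORT B =====
def pairsB (tviti : List String) : PySem.Set (Option String × String) :=
  tviti.foldl (fun pairs tvit =>
    (PySem.Str.split₀ tvit).foldl
      (fun pairs beseda => pairs.add (avtorA tvit, izloci_besedoA beseda)) pairs)
    PySem.Set.empty

def se_poznata1_alt (tviti : List String) (oseba1 : String) (oseba2 : String) : Option Bool :=
  if (!(vse_osebeA tviti).contains (some oseba1)) || (!(vse_osebeA tviti).contains (some oseba2))
  then some false
  else if (pairsB tviti).contains (some oseba1, oseba2)
          || (pairsB tviti).contains (some oseba2, oseba1) then some true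
  else none

-- ===== PRECONDITION & SPEC =====
-- Pre_ excludes inputs mixing a wordless (empty/whitespace-only) tweet with a worded one:
-- there Python's sorted in vse_osebe compares None with str and both A and B raise TypeError.
def Pre_se_poznata1 (tviti : List String) (oseba1 : String) (oseba2 : String) : Prop :=
  (∀ t ∈ tviti, PySem.Str.split₀ t ≠ []) ∨ (∀ t ∈ tviti, PySem.Str.split₀ t = [])
instance (tviti : List String) (oseba1 : String) (oseba2 : String) : Decidable (Pre_se_poznata1 tviti oseba1 oseba2) := by unfold Pre_se_poznata1; infer_instance

def pvWitness_se_poznata1 : List String × String × String := (["ana: @bob hej"], "ana", "bob")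

def Spec_se_poznata1 (tviti : List String) (oseba1 : String) (oseba2 : String) (out : Option Bool) : Prop := out = se_poznata1_alt tviti oseba1 oseba2
instance (tviti : List String) (oseba1 : String) (oseba2 : String) (out : Option Bool) : Decidable (Spec_se_poznata1 tviti oseba1 oseba2 out) := by unfold Spec_se_poznata1; infer_instance

-- ===== CLAIM (what is proved, stated in full; the proofs are below) =====
def Claim_equal_se_poznata1 : Prop := ∀ (tviti : List String) (oseba1 : String) (oseba2 : String), Dom_se_poznata1 tviti oseba1 oseba2 → Pre_se_poznata1 tviti oseba1 oseba2 → Spec_se_poznata1 tviti oseba1 oseba2 (se_poznata1 tviti oseba1 oseba2)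

-- ===== LEMMAS AND PROOFS =====

-- one tweet matches A's search iff it yields a relevant pair in either direction
def matchB (oseba1 oseba2 : String) (tvit : String) : Bool :=
  (avtorA tvit == some oseba1 && (PySem.Str.split₀ tvit).any (fun w => oseba2 == izloci_besedoA w))
  || (avtorA tvit == some oseba2 && (PySem.Str.split₀ tvit).any (fun w => oseba1 == izloci_besedoA w))

theorem loopA_eq (oseba1 oseba2 : String) (l : List String) :
    sePoznataLoopA oseba1 oseba2 l = if l.any (matchB oseba1 oseba2) then some true else none := by
  induction l with
  | nil => simp [sePoznataLoopA]
  | cons tvit rest ih =>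
    simp only [sePoznataLoopA, List.any_cons, ih]
    cases hb1 : (avtorA tvit == some oseba1) with
    | true =>
      have h1 : avtorA tvit = some oseba1 := by simpa using hb1
      cases hb2 : (avtorA tvit == some oseba2) with
      | true =>
        have h2 : some oseba1 = some oseba2 := by rw [← h1]; simpa using hb2
        have heq : oseba1 = oseba2 := by injection h2
        subst heq
        cases ha : ((PySem.Str.split₀ tvit).any (fun w => oseba1 == izloci_besedoA w)) <;>
          simp [matchB, h1, ha]
      | false =>
        have hne : oseba1 ≠ oseba2 := by
          intro e; rw [h1, ← e] at hb2; simp at hb2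
        cases ha : ((PySem.Str.split₀ tvit).any (fun w => oseba2 == izloci_besedoA w)) <;>
          simp [matchB, h1, ha, hne]
    | false =>
      cases hb2 : (avtorA tvit == some oseba2) with
      | true =>
        have h2 : avtorA tvit = some oseba2 := by simpa using hb2
        have hne : oseba2 ≠ oseba1 := by
          intro e; rw [h2, ← e] at hb1; simp at hb1
        cases ha : ((PySem.Str.split₀ tvit).any (fun w => oseba1 == izloci_besedoA w)) <;>
          simp [matchB, h2, ha, hne]
      | false => simp [matchB, hb1, hb2]

theorem mem_pairsB_aux (l : List String) (s : PySem.Set (Option String × String))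
    (y : Option String × String) :
    y ∈ l.foldl (fun pairs tvit =>
        (PySem.Str.split₀ tvit).foldl
          (fun pairs beseda => pairs.add (avtorA tvit, izloci_besedoA beseda)) pairs) s
      ↔ y ∈ s ∨ ∃ t ∈ l, ∃ w ∈ PySem.Str.split₀ t, y = (avtorA t, izloci_besedoA w) := by
  induction l generalizing s with
  | nil => simp
  | cons tvit rest ih =>
    simp only [List.foldl_cons, ih, PySem.Set.mem_foldl_add, List.mem_cons]
    constructor
    · rintro ((h | ⟨w, hw, hy⟩) | ⟨t, ht, hrest⟩)
      · exact Or.inl h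
      · exact Or.inr ⟨tvit, Or.inl rfl, w, hw, hy⟩
      · exact Or.inr ⟨t, Or.inr ht, hrest⟩
    · rintro (h | ⟨t, (rfl | ht'), w, hw, hy⟩)
      · exact Or.inl (Or.inl h)
      · exact Or.inl (Or.inr ⟨w, hw, hy⟩)
      · exact Or.inr ⟨t, ht', w, hw, hy⟩

theorem search_eq (tviti : List String) (oseba1 oseba2 : String) :
    tviti.any (matchB oseba1 oseba2)
      = ((pairsB tviti).contains (some oseba1, oseba2)
        || (pairsB tviti).contains (some oseba2, oseba1)) := by
  rw [Bool.eq_iff_iff]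
  simp only [Bool.or_eq_true, PySem.Set.contains_iff, pairsB, mem_pairsB_aux,
    List.any_eq_true, matchB, Bool.and_eq_true, beq_iff_eq, Prod.mk.injEq,
    PySem.Set.empty, List.not_mem_nil, false_or]
  constructor
  · rintro ⟨t, ht, ⟨ha, w, hw, hv⟩ | ⟨ha, w, hw, hv⟩⟩
    · exact Or.inl ⟨t, ht, w, hw, ha.symm, hv⟩
    · exact Or.inr ⟨t, ht, w, hw, ha.symm, hv⟩
  · rintro (⟨t, ht, w, hw, h1, h2⟩ | ⟨t, ht, w, hw, h1, h2⟩)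
    · exact ⟨t, ht, Or.inl ⟨h1.symm, w, hw, h2⟩⟩
    · exact ⟨t, ht, Or.inr ⟨h1.symm, w, hw, h2⟩⟩

-- ===== VERDICT (by name: the statement is the Claim_ definition above) =====
theorem se_poznata1_spec : Claim_equal_se_poznata1 := by
  intro tviti oseba1 oseba2 _ _
  unfold Spec_se_poznata1 se_poznata1 se_poznata1_alt
  rw [loopA_eq, search_eq]
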